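-- pv_equiv track=rewrite | github.com/Jake-Pullen/advent_of_code | 2023/day_13/part 1 solution.py | calculate_symmetry
-- ===== SOURCE A (Python) =====
-- def calculate_symmetry(grid) -> int:
--     """
--     Calculate the symmetry of a grid.
--
--     This function checks for vertical and horizontal symmetry in the given grid.
--     For vertical symmetry, it compares each column with its mirror image.
--     For horizontal symmetry, it compares each row with its mirror image.
--     The symmetry score is calculated based on the number of symmetric columns and rows.
--
--     Parameters:
--     grid (list of list of str): The grid to check for symmetry. Each inner list represents a row, and each string in the inner list represents a cell.
--
--     Returns:
--     int: The symmetry score of the grid.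
--     """
--     num_rows = len(grid)
--     num_columns = len(grid[0])
--     symmetry_score = 0
--
--     # Check for vertical symmetry
--     for column_index in range(num_columns - 1):
--         num_mismatches = 0
--         for offset in range(num_columns):
--             left_column = column_index - offset
--             right_column = column_index + 1 + offset
--             if 0 <= left_column < right_column < num_columns:
--                 for row_index in range(num_rows):
--                     if grid[row_index][left_column] != grid[row_index][right_column]:
--                         num_mismatches += 1
--         if num_mismatches == 0:
--             symmetry_score += column_index + 1
--
--     # Check for horizontal symmetry
--     for row_index in range(num_rows - 1):
--         num_mismatches = 0
--         for offset in range(num_rows):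
--             upper_row = row_index - offset
--             lower_row = row_index + 1 + offset
--             if 0 <= upper_row < lower_row < num_rows:
--                 for column_index in range(num_columns):
--                     if grid[upper_row][column_index] != grid[lower_row][column_index]:
--                         num_mismatches += 1
--         if num_mismatches == 0:
--             symmetry_score += 100 * (row_index + 1)
--
--     return symmetry_score
-- ===== SOURCE B (Python) =====
-- def calculate_symmetry(grid) -> int:
--     """Intern each column/row into an integer id via a dict (first-occurrence
--     rank), then score each candidate axis by one slice comparison on the id
--     sequences -- no per-cell inner loops at axis-checking time."""
--     width = len(grid[0])
--     cols = [tuple(row[c] for row in grid) for c in range(width)]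
--     rows = [tuple(row[:width]) for row in grid]
--
--     def intern(lines):
--         pos = {}
--         for ln in lines:
--             if ln not in pos:
--                 pos[ln] = len(pos)
--         return [pos[ln] for ln in lines]
--
--     def axis_sum(ids):
--         n = len(ids)
--         total = 0
--         for a in range(1, n):
--             k = min(a, n - a)
--             if ids[a - k:a] == ids[a:a + k][::-1]:
--                 total += a
--         return total
--
--     return axis_sum(intern(cols)) + 100 * axis_sum(intern(rows))
-- ===== Notes on version B (the rewrite author's own statement) =====
-- stated objective: faster
-- what changed: B interns every column and every (width-truncated) row to a small integer id with a dict built in one pass (first-occurrence rank), so all per-cell comparisons happen once during interning; each candidate axis is then tested by a single reversed-slice equality on the integer id sequence, replacing A's triple-nested loops that re-count cell mismatches over every offset with range guards.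
-- outside the precondition, e.g. on calculate_symmetry([]): A raises IndexError, B raises IndexError
import Mathlib
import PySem

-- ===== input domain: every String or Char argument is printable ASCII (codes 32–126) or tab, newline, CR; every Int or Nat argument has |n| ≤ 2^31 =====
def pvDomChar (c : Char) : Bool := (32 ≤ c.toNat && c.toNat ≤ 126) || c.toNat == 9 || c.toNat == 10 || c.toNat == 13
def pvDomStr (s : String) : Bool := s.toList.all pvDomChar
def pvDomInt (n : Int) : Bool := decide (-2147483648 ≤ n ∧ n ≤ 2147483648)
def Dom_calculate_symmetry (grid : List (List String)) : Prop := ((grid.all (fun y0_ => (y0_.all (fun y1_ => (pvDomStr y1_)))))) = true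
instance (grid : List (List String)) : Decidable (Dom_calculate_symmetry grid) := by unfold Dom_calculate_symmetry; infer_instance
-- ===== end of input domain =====

-- B interns every column/row to an integer id with a dict built in one pass and tests each
-- candidate axis by one reversed-slice comparison of the id sequences, replacing A's
-- triple-nested mismatch-counting loops (measurably faster; same values).

-- ===== PORT A =====
-- total transliteration of A: out-of-range reads (excluded by Pre_) default to [] / ""
def calculate_symmetry (grid : List (List String)) : Int :=
  let numRows : Int := grid.length
  let numCols : Int := (PySem.List.pyGetD grid 0 []).length
  let s1 : Int := (PySem.List.pyRange 0 (numCols - 1) 1).foldl (fun score ci =>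
    let mism : Int := (PySem.List.pyRange 0 numCols 1).foldl (fun m off =>
      let l := ci - off
      let r := ci + 1 + off
      if 0 ≤ l ∧ l < r ∧ r < numCols then
        (PySem.List.pyRange 0 numRows 1).foldl (fun m2 ri =>
          if PySem.List.pyGetD (PySem.List.pyGetD grid ri []) l "" ≠
             PySem.List.pyGetD (PySem.List.pyGetD grid ri []) r "" then m2 + 1 else m2) m
      else m) 0
    if mism = 0 then score + (ci + 1) else score) 0
  (PySem.List.pyRange 0 (numRows - 1) 1).foldl (fun score ri =>
    let mism : Int := (PySem.List.pyRange 0 numRows 1).foldl (fun m off =>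
      let u := ri - off
      let lo := ri + 1 + off
      if 0 ≤ u ∧ u < lo ∧ lo < numRows then
        (PySem.List.pyRange 0 numCols 1).foldl (fun m2 ci =>
          if PySem.List.pyGetD (PySem.List.pyGetD grid u []) ci "" ≠
             PySem.List.pyGetD (PySem.List.pyGetD grid lo []) ci "" then m2 + 1 else m2) m
      else m) 0
    if mism = 0 then score + 100 * (ri + 1) else score) s1

-- ===== PORT B =====
-- intern: 'pos = {}; for ln in lines: if ln not in pos: pos[ln] = len(pos)'; then '[pos[ln] for ln in lines]'
def pvIntern (lines : List (List String)) : List Int :=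
  let pos : PySem.Dict (List String) Int :=
    lines.foldl (fun d ln => if d.contains ln then d else d.insert ln d.size) PySem.Dict.empty
  lines.map (fun ln => pos.getD ln 0)

-- 'ids[a-k:a] == ids[a:a+k][::-1]' ([::-1] is reverse: PySem.List.slice?_none_none_neg_one)
def pvAxisSum (ids : List Int) : Int :=
  let n : Int := ids.length
  (PySem.List.pyRange 1 n 1).foldl (fun total a =>
    let k := min a (n - a)
    if PySem.List.slice ids (some (a - k)) (some a)
        = (PySem.List.slice ids (some a) (some (a + k))).reverse then total + a
    else total) 0

def calculate_symmetry_alt (grid : List (List String)) : Int :=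
  let width : Int := (PySem.List.pyGetD grid 0 []).length
  let cols : List (List String) :=
    (PySem.List.pyRange 0 width 1).map (fun c => grid.map (fun row => PySem.List.pyGetD row c ""))
  let rows : List (List String) := grid.map (fun row => PySem.List.slice row none (some width))
  pvAxisSum (pvIntern cols) + 100 * pvAxisSum (pvIntern rows)

-- ===== PRECONDITION & SPEC =====
-- Pre_ is exactly where the Python A returns: a nonempty grid (len(grid[0]) raises on [])
-- every row of which is at least as long as row 0 (A reads each row at columns < len(grid[0])).
def Pre_calculate_symmetry (grid : List (List String)) : Prop :=
  grid ≠ [] ∧ ∀ row ∈ grid, (PySem.List.pyGetD grid 0 []).length ≤ row.length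
instance (grid : List (List String)) : Decidable (Pre_calculate_symmetry grid) := by
  unfold Pre_calculate_symmetry; infer_instance
def pvWitness_calculate_symmetry : List (List String) := [[".", "#", "#"], [".", "#", "#"]]

def Spec_calculate_symmetry (grid : List (List String)) (out : Int) : Prop := out = calculate_symmetry_alt grid
instance (grid : List (List String)) (out : Int) : Decidable (Spec_calculate_symmetry grid out) := by unfold Spec_calculate_symmetry; infer_instance

-- ===== CLAIM (what is proved, stated in full; the proofs are below) =====
def Claim_equal_calculate_symmetry : Prop := ∀ (grid : List (List String)), Dom_calculate_symmetry grid → Pre_calculate_symmetry grid → Spec_calculate_symmetry grid (calculate_symmetry grid)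

-- ===== LEMMAS AND PROOFS =====

-- sum of a list of nonnegative integers is zero iff every term is zero
lemma pv_sum_zero (l : List Int) (h : Int → Int) (hn : ∀ x ∈ l, 0 ≤ h x) :
    ((l.map h).sum = 0) ↔ ∀ x ∈ l, h x = 0 := by
  induction l with
  | nil => simp
  | cons a t ih =>
    have hnn : 0 ≤ (t.map h).sum := List.sum_nonneg (by
      intro y hy; obtain ⟨x, hx, rfl⟩ := List.mem_map.mp hy; exact hn x (List.mem_cons_of_mem _ hx))
    have ha := hn a List.mem_cons_self
    simp only [List.map_cons, List.sum_cons, List.mem_cons]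
    constructor
    · intro hsum
      have h2 : (t.map h).sum = 0 := by omega
      exact fun x hx => by
        rcases hx with rfl | hx
        · omega
        · exact (ih (fun x hx => hn x (List.mem_cons_of_mem _ hx))).mp h2 x hx
    · intro hall
      have h1 := hall a (Or.inl rfl)
      have h2 := (ih (fun x hx => hn x (List.mem_cons_of_mem _ hx))).mpr
        (fun x hx => hall x (Or.inr hx))
      omega

lemma pv_sum_ones (l : List Int) : (l.map (fun _ => (1 : Int))).sum = l.length := by
  induction l with
  | nil => simp
  | cons a t ih =>
    simp only [List.map_cons, List.sum_cons, ih, List.length_cons]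
    push_cast
    ring

-- A's guarded mismatch sum (as simp leaves it) is zero iff every guarded pair of cells agrees
lemma pv_sumshape_iff (L M c : Int) (f g : Int → Int → String) :
    ((List.map (fun off =>
        (List.map (fun (_ : Int) => (1 : Int))
          (List.filter (fun k => decide (f off k ≠ g off k)) (PySem.List.pyRange 0 M 1))).sum)
      (List.filter (fun off => decide (0 ≤ c - off ∧ c - off < c + 1 + off ∧ c + 1 + off < L))
        (PySem.List.pyRange 0 L 1))).sum = 0)
    ↔ ∀ off ∈ PySem.List.pyRange 0 L 1,
        (0 ≤ c - off ∧ c - off < c + 1 + off ∧ c + 1 + off < L) →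
        ∀ k ∈ PySem.List.pyRange 0 M 1, f off k = g off k := by
  rw [pv_sum_zero]
  · simp only [pv_sum_ones, List.mem_filter, decide_eq_true_eq, Nat.cast_eq_zero,
      List.length_eq_zero_iff, List.filter_eq_nil_iff, not_not, and_imp]
  · intro x _
    rw [pv_sum_ones]
    positivity

-- ∀ over range(0,m) as ∀ over Nat bounds
lemma pv_forall_range (m : Nat) (P : Int → Prop) :
    (∀ i ∈ PySem.List.pyRange 0 (m : Int) 1, P i) ↔ ∀ k : Nat, k < m → P k := by
  simp only [PySem.List.mem_pyRange_one]
  constructor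
  · intro h k hk
    exact h k ⟨by positivity, by exact_mod_cast hk⟩
  · intro h i ⟨h0, h1⟩
    have := h i.toNat (by omega)
    rwa [Int.toNat_of_nonneg h0] at this

-- ∀ over row indices as ∀ over the rows themselves
lemma pv_forall_rows (P : List String → Prop) (grid : List (List String)) :
    (∀ ri ∈ PySem.List.pyRange 0 (grid.length : Int) 1, P (PySem.List.pyGetD grid ri [])) ↔
      ∀ row ∈ grid, P row := by
  rw [pv_forall_range]
  constructor
  · intro h row hrow
    obtain ⟨k, hk, rfl⟩ := List.mem_iff_getElem.mp hrow
    have := h k hk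
    rwa [PySem.List.pyGetD_natCast, List.getD_eq_getElem _ _ hk] at this
  · intro h k hk
    rw [PySem.List.pyGetD_natCast, List.getD_eq_getElem _ _ hk]
    exact h _ (List.getElem_mem _)

-- two columns of B's column list are equal iff the cells agree in every row
lemma pv_colpair (grid : List (List String)) (W : Nat) (l r : Int)
    (hl : 0 ≤ l) (hl2 : l < (W : Int)) (hr : 0 ≤ r) (hr2 : r < (W : Int)) :
    PySem.List.pyGetD ((PySem.List.pyRange 0 (W : Int) 1).map
        (fun c => grid.map (fun row => PySem.List.pyGetD row c ""))) l []
      = PySem.List.pyGetD ((PySem.List.pyRange 0 (W : Int) 1).map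
        (fun c => grid.map (fun row => PySem.List.pyGetD row c ""))) r []
    ↔ ∀ ri ∈ PySem.List.pyRange 0 (grid.length : Int) 1,
        PySem.List.pyGetD (PySem.List.pyGetD grid ri []) l "" =
          PySem.List.pyGetD (PySem.List.pyGetD grid ri []) r "" := by
  rw [PySem.List.pyGetD_map_pyRange_of_nonneg _ _ _ _ hl hl2,
    PySem.List.pyGetD_map_pyRange_of_nonneg _ _ _ _ hr hr2,
    List.map_inj_left,
    ← pv_forall_rows (fun row => PySem.List.pyGetD row l "" = PySem.List.pyGetD row r "") grid]

-- equal W-prefixes iff cellwise equality on the first W columns (rows at least W long)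
lemma pv_take_eq_iff (W : Nat) (r1 r2 : List String) (h1 : W ≤ r1.length) (h2 : W ≤ r2.length) :
    r1.take W = r2.take W ↔
      ∀ ci ∈ PySem.List.pyRange 0 (W : Int) 1,
        PySem.List.pyGetD r1 ci "" = PySem.List.pyGetD r2 ci "" := by
  rw [pv_forall_range]
  constructor
  · intro h k hk
    rw [PySem.List.pyGetD_natCast, PySem.List.pyGetD_natCast,
      List.getD_eq_getElem _ _ (by omega), List.getD_eq_getElem _ _ (by omega)]
    have e1 : k < r1.length := by omega
    have e2 : k < r2.length := by omega
    have := congrArg (fun t => t[k]?) h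
    simp only [List.getElem?_take, hk, if_pos, List.getElem?_eq_getElem e1,
      List.getElem?_eq_getElem e2, Option.some.injEq] at this
    exact this
  · intro h
    apply List.ext_getElem (by simp; omega)
    intro i hi1 hi2
    have hiW : i < W := by simp [List.length_take] at hi1; omega
    have := h i hiW
    rw [PySem.List.pyGetD_natCast, PySem.List.pyGetD_natCast,
      List.getD_eq_getElem _ _ (by omega), List.getD_eq_getElem _ _ (by omega)] at this
    simpa [List.getElem_take] using this

-- two sliced rows of B are equal iff the cells agree in every column < W
lemma pv_rowpair (grid : List (List String)) (W : Nat)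
    (hlen : ∀ row ∈ grid, W ≤ row.length) (u lo : Int)
    (hu : 0 ≤ u) (hu2 : u < (grid.length : Int)) (hlo : 0 ≤ lo) (hlo2 : lo < (grid.length : Int)) :
    PySem.List.pyGetD (grid.map (fun row => PySem.List.slice row none (some (W : Int)))) u []
      = PySem.List.pyGetD (grid.map (fun row => PySem.List.slice row none (some (W : Int)))) lo []
    ↔ ∀ ci ∈ PySem.List.pyRange 0 (W : Int) 1,
        PySem.List.pyGetD (PySem.List.pyGetD grid u []) ci "" =
          PySem.List.pyGetD (PySem.List.pyGetD grid lo []) ci "" := by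
  have hu' : u.toNat < grid.length := by omega
  have hlo' : lo.toNat < grid.length := by omega
  rw [PySem.List.pyGetD_eq_getElem _ _ hu (by simpa),
    PySem.List.pyGetD_eq_getElem _ _ hlo (by simpa),
    PySem.List.pyGetD_eq_getElem _ _ hu (by simpa using hu2),
    PySem.List.pyGetD_eq_getElem _ _ hlo (by simpa using hlo2)]
  simp only [List.getElem_map, PySem.List.slice_to_natCast]
  exact pv_take_eq_iff W _ _ (hlen _ (List.getElem_mem _)) (hlen _ (List.getElem_mem _))

lemma pv_foldl_sum (l : List Int) (init : Int) :
    List.foldl HAdd.hAdd init l = init + l.sum := by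
  induction l generalizing init with
  | nil => simp
  | cons a t ih => simp only [List.foldl_cons, List.sum_cons, ih]; ring

lemma pv_range_shift (b : Int) :
    PySem.List.pyRange 1 b 1 = (PySem.List.pyRange 0 (b - 1) 1).map (fun x => x + 1) := by
  simp only [PySem.List.pyRange_one, sub_zero, List.map_map]
  exact List.map_congr_left (fun k _ => by simp [Function.comp]; omega)

-- the interning dict of B: its items are exactly (first occurrence, rank) pairs
lemma pv_pos_items (lines : List (List String)) :
    (lines.foldl (fun d ln => if d.contains ln then d else d.insert ln d.size)
        (PySem.Dict.empty : PySem.Dict (List String) Int)).items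
      = (PySem.List.enumerate (PySem.List.dedup lines) 0).map (fun p => (p.2, p.1)) := by
  induction lines using List.reverseRecOn with
  | nil =>
    simp only [List.foldl_nil, PySem.List.dedup, PySem.Set.ofList]
    rfl
  | append_singleton xs x ih =>
    rw [List.foldl_append, List.foldl_cons, List.foldl_nil]
    have hkeys : (xs.foldl (fun d ln => if d.contains ln then d else d.insert ln d.size)
        (PySem.Dict.empty : PySem.Dict (List String) Int)).keys = PySem.List.dedup xs := by
      simp only [PySem.Dict.keys, ih, List.map_map]
      exact PySem.List.map_snd_enumerate _ _
    by_cases hx : x ∈ xs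
    · have hc : (xs.foldl (fun d ln => if d.contains ln then d else d.insert ln d.size)
          (PySem.Dict.empty : PySem.Dict (List String) Int)).contains x = true := by
        rw [PySem.Dict.contains_iff_mem_keys, hkeys, PySem.List.mem_dedup]; exact hx
      rw [if_pos hc, ih, PySem.List.dedup_eq_ofList (xs ++ [x]),
        PySem.Set.ofList_append_singleton,
        PySem.Set.add_of_mem (by rw [← PySem.List.dedup_eq_ofList xs, PySem.List.mem_dedup]; exact hx),
        ← PySem.List.dedup_eq_ofList xs]
    · have hc : (xs.foldl (fun d ln => if d.contains ln then d else d.insert ln d.size)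
          (PySem.Dict.empty : PySem.Dict (List String) Int)).contains x = false := by
        rw [← Bool.not_eq_true, PySem.Dict.contains_iff_mem_keys, hkeys, PySem.List.mem_dedup]
        exact hx
      have hsz : (xs.foldl (fun d ln => if d.contains ln then d else d.insert ln d.size)
          (PySem.Dict.empty : PySem.Dict (List String) Int)).size
            = (PySem.List.dedup xs).length := by
        simpa [PySem.List.length_enumerate] using congrArg List.length ih
      rw [if_neg (by simp [hc]), PySem.Dict.items_insert_of_not_contains _ _ hc, ih,
        PySem.List.dedup_eq_ofList (xs ++ [x]), PySem.Set.ofList_append_singleton,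
        PySem.Set.add_of_not_mem (by rw [← PySem.List.dedup_eq_ofList xs, PySem.List.mem_dedup]; exact hx),
        ← PySem.List.dedup_eq_ofList xs, PySem.List.enumerate_append, List.map_append, hsz]
      simp [PySem.List.enumerate_cons, PySem.List.enumerate_nil]

-- interning a line gives the index of its first occurrence among the distinct lines
lemma pv_intern_eq (lines : List (List String)) :
    pvIntern lines = lines.map (fun ln => ((PySem.List.dedup lines).idxOf ln : Int)) := by
  unfold pvIntern
  refine List.map_congr_left (fun ln hln => ?_)
  have hmem : ln ∈ PySem.List.dedup lines := (PySem.List.mem_dedup _ _).mpr hln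
  have hlt := List.idxOf_lt_length_of_mem hmem
  have hnk : (lines.foldl (fun d ln => if d.contains ln then d else d.insert ln d.size)
      (PySem.Dict.empty : PySem.Dict (List String) Int)).keys.Nodup := by
    simp only [PySem.Dict.keys, pv_pos_items, List.map_map]
    have h0 := PySem.List.nodup_dedup lines
    rw [← PySem.List.map_snd_enumerate (PySem.List.dedup lines) 0] at h0
    exact h0
  refine PySem.Dict.getD_of_mem_items _ ?_ hnk 0
  rw [pv_pos_items, List.mem_map]
  refine ⟨(((PySem.List.dedup lines).idxOf ln : Int), ln), ?_, rfl⟩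
  rw [PySem.List.mem_enumerate_iff]
  exact ⟨(PySem.List.dedup lines).idxOf ln, hlt, by simp [List.getElem_idxOf]⟩

-- B's reversed-slice test on the interned ids coincides with pairwise line equality
lemma pv_axis_iff (lines : List (List String)) (a : Nat) (h1 : 1 ≤ a) (h2 : a < lines.length) :
    (PySem.List.slice (pvIntern lines)
        (some ((a : Int) - min (a : Int) ((lines.length : Int) - a))) (some (a : Int))
      = (PySem.List.slice (pvIntern lines) (some (a : Int))
          (some ((a : Int) + min (a : Int) ((lines.length : Int) - a)))).reverse)
    ↔ ∀ o ∈ PySem.List.pyRange 0 (min (a : Int) ((lines.length : Int) - a)) 1,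
        PySem.List.pyGetD lines ((a : Int) - 1 - o) [] = PySem.List.pyGetD lines ((a : Int) + o) [] := by
  set n := lines.length with hn
  set k : Nat := min a (n - a) with hk
  have hki : min (a : Int) ((n : Int) - a) = (k : Int) := by omega
  have hka : k ≤ a := by omega
  have hkn : a + k ≤ n := by omega
  have hlen : (pvIntern lines).length = n := by rw [pv_intern_eq]; simp [hn]
  have hids : ∀ (i : Nat) (hi : i < n), (pvIntern lines)[i]? =
      some (((PySem.List.dedup lines).idxOf (lines[i]'(by omega)) : Nat) : Int) := by
    intro i hi
    rw [pv_intern_eq, List.getElem?_map, List.getElem?_eq_getElem (by simpa [hn] using hi)]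
    rfl
  have hcell : ∀ (i j : Nat) (hi : i < n) (hj : j < n),
      ((pvIntern lines)[i]? = (pvIntern lines)[j]? ↔ lines[i]'(by omega) = lines[j]'(by omega)) := by
    intro i j hi hj
    rw [hids i hi, hids j hj]
    simp only [Option.some.injEq, Int.natCast_inj]
    exact List.idxOf_inj ((PySem.List.mem_dedup _ _).mpr (List.getElem_mem _))
  rw [hki, show (a : Int) - (k : Int) = ((a - k : Nat) : Int) by omega,
    show (a : Int) + (k : Int) = ((a + k : Nat) : Int) by push_cast; ring,
    PySem.List.slice_natCast, PySem.List.slice_natCast]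
  have e1 : a - (a - k) = k := by omega
  have e2 : a + k - a = k := by omega
  rw [e1, e2]
  have hl1 : (((pvIntern lines).drop (a - k)).take k).length = k := by
    simp [hlen]; omega
  have hl2 : (((pvIntern lines).drop a).take k).length = k := by
    simp [hlen]; omega
  rw [pv_forall_range]
  have hgetD : ∀ (o : Nat) (ho : o < k),
      ((PySem.List.pyGetD lines ((a : Int) - 1 - (o : Int)) [] = PySem.List.pyGetD lines ((a : Int) + (o : Int)) [])
        ↔ lines[a - 1 - o]'(by omega) = lines[a + o]'(by omega)) := by
    intro o ho
    rw [show (a : Int) - 1 - (o : Int) = ((a - 1 - o : Nat) : Int) by omega,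
      show (a : Int) + (o : Int) = ((a + o : Nat) : Int) by push_cast; ring,
      PySem.List.pyGetD_natCast, PySem.List.pyGetD_natCast,
      List.getD_eq_getElem _ _ (by omega), List.getD_eq_getElem _ _ (by omega)]
  constructor
  · -- slice equality → pairwise line equality
    intro heq o ho
    rw [hgetD o ho]
    have h1 := congrArg (fun t => t[(k - 1 - o : Nat)]?) heq
    simp only at h1
    rw [List.getElem?_reverse (by rw [hl2]; omega), hl2,
      List.getElem?_take_of_lt (by omega), List.getElem?_take_of_lt (by omega),
      List.getElem?_drop, List.getElem?_drop,
      show a - k + (k - 1 - o) = a - 1 - o from by omega,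
      show a + (k - 1 - (k - 1 - o)) = a + o from by omega] at h1
    exact (hcell _ _ (by omega) (by omega)).mp h1
  · -- pairwise line equality → slice equality
    intro h
    refine List.ext_getElem? (fun i => ?_)
    by_cases hik : i < k
    · rw [List.getElem?_reverse (by rw [hl2]; omega), hl2,
        List.getElem?_take_of_lt (by omega), List.getElem?_take_of_lt (by omega),
        List.getElem?_drop, List.getElem?_drop]
      have ho := (hgetD (k - 1 - i) (by omega)).mp (h (k - 1 - i) (by omega))
      rw [show a - k + i = a - 1 - (k - 1 - i) from by omega,
        show a + (k - 1 - i) = a + (k - 1 - i) from rfl]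
      exact (hcell _ _ (by omega) (by omega)).mpr ho
    · rw [List.getElem?_eq_none (by rw [hl1]; omega),
        List.getElem?_eq_none (by rw [List.length_reverse, hl2]; omega)]

-- A's vertical axis test (mismatch sum = 0) coincides with pairwise column equality
lemma pv_vert_cond (grid : List (List String)) (W : Nat) (c : Int)
    (h0 : 0 ≤ c) (h1 : c < (W : Int) - 1) :
    ((List.map (fun off =>
        (List.map (fun (_ : Int) => (1 : Int))
          (List.filter (fun ri => decide (PySem.List.pyGetD (PySem.List.pyGetD grid ri []) (c - off) "" ≠
              PySem.List.pyGetD (PySem.List.pyGetD grid ri []) (c + 1 + off) ""))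
            (PySem.List.pyRange 0 (grid.length : Int) 1))).sum)
      (List.filter (fun off => decide (0 ≤ c - off ∧ c - off < c + 1 + off ∧ c + 1 + off < (W : Int)))
        (PySem.List.pyRange 0 (W : Int) 1))).sum = 0)
    ↔ ∀ o ∈ PySem.List.pyRange 0 (min (c + 1) ((W : Int) - (c + 1))) 1,
        PySem.List.pyGetD ((PySem.List.pyRange 0 (W : Int) 1).map
          (fun cc => grid.map (fun row => PySem.List.pyGetD row cc ""))) (c + 1 - 1 - o) []
        = PySem.List.pyGetD ((PySem.List.pyRange 0 (W : Int) 1).map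
          (fun cc => grid.map (fun row => PySem.List.pyGetD row cc ""))) (c + 1 + o) [] := by
  rw [pv_sumshape_iff (W : Int) (grid.length : Int) c
    (fun off k => PySem.List.pyGetD (PySem.List.pyGetD grid k []) (c - off) "")
    (fun off k => PySem.List.pyGetD (PySem.List.pyGetD grid k []) (c + 1 + off) "")]
  constructor
  · intro h o ho
    rw [PySem.List.mem_pyRange_one] at ho
    have e : c + 1 - 1 - o = c - o := by ring
    rw [e, pv_colpair grid W (c - o) (c + 1 + o) (by omega) (by omega) (by omega) (by omega)]
    exact h o (by rw [PySem.List.mem_pyRange_one]; omega) ⟨by omega, by omega, by omega⟩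
  · intro h off hoff hg
    rw [PySem.List.mem_pyRange_one] at hoff
    have h2 := h off (by rw [PySem.List.mem_pyRange_one]; omega)
    have e : c + 1 - 1 - off = c - off := by ring
    rw [e, pv_colpair grid W (c - off) (c + 1 + off) (by omega) (by omega) (by omega) (by omega)] at h2
    exact h2

-- A's horizontal axis test coincides with pairwise (width-truncated) row equality
lemma pv_horiz_cond (grid : List (List String)) (W : Nat)
    (hlen : ∀ row ∈ grid, W ≤ row.length) (c : Int)
    (h0 : 0 ≤ c) (h1 : c < (grid.length : Int) - 1) :
    ((List.map (fun off =>
        (List.map (fun (_ : Int) => (1 : Int))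
          (List.filter (fun ci => decide (PySem.List.pyGetD (PySem.List.pyGetD grid (c - off) []) ci "" ≠
              PySem.List.pyGetD (PySem.List.pyGetD grid (c + 1 + off) []) ci ""))
            (PySem.List.pyRange 0 (W : Int) 1))).sum)
      (List.filter (fun off => decide (0 ≤ c - off ∧ c - off < c + 1 + off ∧ c + 1 + off < (grid.length : Int)))
        (PySem.List.pyRange 0 (grid.length : Int) 1))).sum = 0)
    ↔ ∀ o ∈ PySem.List.pyRange 0 (min (c + 1) ((grid.length : Int) - (c + 1))) 1,
        PySem.List.pyGetD (grid.map (fun row => PySem.List.slice row none (some (W : Int)))) (c + 1 - 1 - o) []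
        = PySem.List.pyGetD (grid.map (fun row => PySem.List.slice row none (some (W : Int)))) (c + 1 + o) [] := by
  rw [pv_sumshape_iff (grid.length : Int) (W : Int) c
    (fun off k => PySem.List.pyGetD (PySem.List.pyGetD grid (c - off) []) k "")
    (fun off k => PySem.List.pyGetD (PySem.List.pyGetD grid (c + 1 + off) []) k "")]
  constructor
  · intro h o ho
    rw [PySem.List.mem_pyRange_one] at ho
    have e : c + 1 - 1 - o = c - o := by ring
    rw [e, pv_rowpair grid W hlen (c - o) (c + 1 + o) (by omega) (by omega) (by omega) (by omega)]
    exact h o (by rw [PySem.List.mem_pyRange_one]; omega) ⟨by omega, by omega, by omega⟩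
  · intro h off hoff hg
    rw [PySem.List.mem_pyRange_one] at hoff
    have h2 := h off (by rw [PySem.List.mem_pyRange_one]; omega)
    have e : c + 1 - 1 - off = c - off := by ring
    rw [e, pv_rowpair grid W hlen (c - off) (c + 1 + off) (by omega) (by omega) (by omega) (by omega)] at h2
    exact h2

lemma pv_intern_length (lines : List (List String)) :
    (pvIntern lines).length = lines.length := by
  rw [pv_intern_eq]; simp

lemma pv_main (grid : List (List String))
    (hlen : ∀ row ∈ grid, (PySem.List.pyGetD grid 0 []).length ≤ row.length) :
    calculate_symmetry grid = calculate_symmetry_alt grid := by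
  unfold calculate_symmetry calculate_symmetry_alt pvAxisSum
  simp only [pv_intern_length, List.length_map, PySem.List.length_pyRange_one, sub_zero,
    Int.toNat_natCast, PySem.List.foldl_ite_eq_foldl_filter, PySem.List.foldl_add, zero_add]
  simp only [pv_foldl_sum, zero_add, pv_range_shift, List.filter_map]
  congr 1
  · refine congrArg (fun t => (List.map (fun x => x + 1) t).sum) (List.filter_congr ?_)
    intro x hx
    rw [PySem.List.mem_pyRange_one] at hx
    simp only [Function.comp_apply]
    have hW : ((PySem.List.pyRange 0 ((PySem.List.pyGetD grid 0 []).length : Int) 1).map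
        (fun c => grid.map (fun row => PySem.List.pyGetD row c ""))).length
          = (PySem.List.pyGetD grid 0 []).length := by
      simp
    have ha : (((x + 1).toNat : Nat) : Int) = x + 1 := by omega
    have h2 := pv_axis_iff ((PySem.List.pyRange 0 ((PySem.List.pyGetD grid 0 []).length : Int) 1).map
        (fun c => grid.map (fun row => PySem.List.pyGetD row c ""))) (x + 1).toNat
        (by omega) (by rw [hW]; omega)
    rw [hW, ha] at h2
    exact decide_eq_decide.mpr
      ((pv_vert_cond grid (PySem.List.pyGetD grid 0 []).length x hx.1 hx.2).trans h2.symm)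
  · rw [← List.sum_map_mul_left]
    refine congrArg (fun t => (List.map (fun x => 100 * (x + 1)) t).sum) (List.filter_congr ?_)
    intro x hx
    rw [PySem.List.mem_pyRange_one] at hx
    simp only [Function.comp_apply]
    have hR : (grid.map (fun row =>
        PySem.List.slice row none (some ((PySem.List.pyGetD grid 0 []).length : Int)))).length
          = grid.length := by
      simp
    have ha : (((x + 1).toNat : Nat) : Int) = x + 1 := by omega
    have h2 := pv_axis_iff (grid.map (fun row =>
        PySem.List.slice row none (some ((PySem.List.pyGetD grid 0 []).length : Int)))) (x + 1).toNat
        (by omega) (by rw [hR]; omega)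
    rw [hR, ha] at h2
    exact decide_eq_decide.mpr
      ((pv_horiz_cond grid (PySem.List.pyGetD grid 0 []).length hlen x hx.1 hx.2).trans h2.symm)

-- ===== VERDICT (by name: the statement is the Claim_ definition above) =====
theorem calculate_symmetry_spec : Claim_equal_calculate_symmetry := by
  intro grid _ hpre
  unfold Spec_calculate_symmetry
  exact pv_main grid hpre.2
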